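-- pv_equiv track=rewrite | github.com/qqqyyy111/merge_test | tool/seconds2time.py | seconds_to_time
-- ===== SOURCE A (Python) =====
-- def seconds_to_time(time):
--     time_list = []
--     for i in range(len(time)):
--         seconds = i
--         m, s = divmod(seconds, 60)
--         if s < 10:
--             time_list.append(str(m) + ":0" + str(s))
--         else:
--             time_list.append(str(m) + ":" + str(s))
--
--     return time_list
-- ===== SOURCE B (Python) =====
-- def seconds_to_time(time):
--     n = len(time)
--     result = []
--     m = 0
--     while len(result) < n:
--         for s in range(60):
--             if len(result) == n:
--                 break
--             result.append(f"{m}:{s:02d}")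
--         m += 1
--     return result
-- ===== Notes on version B (the rewrite author's own statement) =====
-- stated objective: alternative
-- what changed: Replaces the per-index divmod loop with two nested counters (minute counter m, inner seconds loop over range(60)) that emit f-strings until len(time) items are produced.
import Mathlib
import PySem

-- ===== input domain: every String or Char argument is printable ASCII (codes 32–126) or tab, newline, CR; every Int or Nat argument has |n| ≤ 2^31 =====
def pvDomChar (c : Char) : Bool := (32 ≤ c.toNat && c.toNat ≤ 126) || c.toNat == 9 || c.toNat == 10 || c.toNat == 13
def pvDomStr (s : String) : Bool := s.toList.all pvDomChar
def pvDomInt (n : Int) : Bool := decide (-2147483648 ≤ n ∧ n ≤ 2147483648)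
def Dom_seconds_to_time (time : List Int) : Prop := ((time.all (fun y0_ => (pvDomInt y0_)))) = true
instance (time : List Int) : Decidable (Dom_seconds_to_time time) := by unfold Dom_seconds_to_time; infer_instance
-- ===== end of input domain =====

-- B replaces the per-index divmod loop with two nested counters (minute, second) that emit one string per item; same O(n) cost (objective: alternative).

-- ===== PORT A =====
def seconds_to_time (time : List Int) : List String :=
  (PySem.List.pyRange 0 (time.length : Int) 1).foldl (fun time_list i =>
    let seconds := i
    let m := PySem.Int.floordiv seconds 60
    let s := PySem.Int.mod seconds 60
    if s < 10 then time_list ++ [PySem.Int.toStr m ++ ":0" ++ PySem.Int.toStr s]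
    else time_list ++ [PySem.Int.toStr m ++ ":" ++ PySem.Int.toStr s]) []

-- ===== PORT B =====
-- f"{m}:{s:02d}" — exact for 0 ≤ s < 100 (here s ranges over 0..59)
def pvFmt (m s : Int) : String :=
  PySem.Int.toStr m ++ ":" ++ (if s < 10 then "0" ++ PySem.Int.toStr s else PySem.Int.toStr s)

-- inner loop: 'for s in range(60): if len(result) == n: break; result.append(f"{m}:{s:02d}")'
def pvInner : List Int → Nat → Int → List String → List String
  | [], _, _, acc => acc
  | s :: rest, n, m, acc =>
    if acc.length = n then acc
    else pvInner rest n m (acc ++ [pvFmt m s])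

-- termination facts for the outer while-loop
theorem pvInner_length_le (ss : List Int) (n : Nat) (m : Int) :
    ∀ acc : List String, acc.length ≤ (pvInner ss n m acc).length := by
  induction ss with
  | nil => intro acc; simp [pvInner]
  | cons s rest ih =>
    intro acc
    simp only [pvInner]
    split
    · exact le_refl _
    · exact le_trans (by simp) (ih (acc ++ [pvFmt m s]))

theorem pvInner_length_lt (ss : List Int) (n : Nat) (m : Int) (acc : List String)
    (h : acc.length < n) (hne : ss ≠ []) : acc.length < (pvInner ss n m acc).length := by
  cases ss with
  | nil => exact absurd rfl hne
  | cons s rest =>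
    simp only [pvInner]
    rw [if_neg (by omega)]
    calc acc.length < (acc ++ [pvFmt m s]).length := by simp
      _ ≤ _ := pvInner_length_le rest n m _

-- outer loop: 'while len(result) < n: <inner>; m += 1'
def pvOuter (n : Nat) (m : Int) (acc : List String) : List String :=
  if h : acc.length < n then
    pvOuter n (m + 1) (pvInner (PySem.List.pyRange 0 60 1) n m acc)
  else acc
termination_by n - acc.length
decreasing_by
  have := pvInner_length_lt (PySem.List.pyRange 0 60 1) n m acc h (by decide)
  omega

def seconds_to_time_alt (time : List Int) : List String :=
  pvOuter time.length 0 []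

-- ===== PRECONDITION & SPEC =====
def Spec_seconds_to_time (time : List Int) (out : List String) : Prop := out = seconds_to_time_alt time
instance (time : List Int) (out : List String) : Decidable (Spec_seconds_to_time time out) := by unfold Spec_seconds_to_time; infer_instance

-- ===== CLAIM (what is proved, stated in full; the proofs are below) =====
def Claim_equal_seconds_to_time : Prop := ∀ (time : List Int), Dom_seconds_to_time time → Spec_seconds_to_time time (seconds_to_time time)

-- ===== LEMMAS AND PROOFS =====

theorem pvInner_eq (ss : List Int) (n : Nat) (m : Int) :
    ∀ acc : List String, acc.length ≤ n →
      pvInner ss n m acc = acc ++ ((ss.take (n - acc.length)).map (pvFmt m)) := by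
  induction ss with
  | nil => intro acc _; simp [pvInner]
  | cons s rest ih =>
    intro acc hle
    simp only [pvInner]
    by_cases h : acc.length = n
    · rw [if_pos h]
      simp [h]
    · rw [if_neg h]
      have hlt : acc.length < n := lt_of_le_of_ne hle h
      rw [ih (acc ++ [pvFmt m s]) (by rw [List.length_append]; simp; omega)]
      rw [List.length_append]
      have h2 : n - acc.length = (n - (acc.length + 1)) + 1 := by omega
      rw [h2, List.take_succ_cons]
      simp [List.append_assoc]

theorem pvRange60 : PySem.List.pyRange 0 60 1 = (List.range 60).map (fun j : Nat => (j : Int)) := by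
  decide

theorem pvOuter_eq (k : Nat) : ∀ (n : Nat) (m : Int) (acc : List String),
    acc.length ≤ n → n - acc.length = k →
    pvOuter n m acc =
      acc ++ (List.range k).map (fun j => pvFmt (m + ((j / 60 : Nat) : Int)) ((j % 60 : Nat) : Int)) := by
  induction k using Nat.strong_induction_on with
  | _ k ih =>
    intro n m acc hle hk
    rw [pvOuter]
    by_cases h : acc.length < n
    · rw [dif_pos h]
      rw [pvInner_eq _ _ _ _ hle, pvRange60, ← List.map_take, List.take_range]
      by_cases hks : k ≤ 60
      · -- final (possibly partial) minute: the recursion then stops at once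
        have ht : min (n - acc.length) 60 = k := by omega
        rw [ht]
        have hlacc' : (acc ++ (((List.range k).map (fun j : Nat => (j : Int))).map (pvFmt m))).length
            = acc.length + k := by simp
        rw [ih 0 (by omega) n (m + 1) _ (by rw [hlacc']; omega) (by rw [hlacc']; omega)]
        simp only [List.range_zero, List.map_nil, List.append_nil]
        congr 1
        rw [List.map_map]
        apply List.map_congr_left
        intro j hj
        rw [List.mem_range] at hj
        have hj60 : j < 60 := by omega
        simp [Function.comp, Nat.div_eq_of_lt hj60, Nat.mod_eq_of_lt hj60]
      · -- a full minute of 60 entries, then recurse with m + 1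
        obtain ⟨k', rfl⟩ : ∃ k', k = 60 + k' := ⟨k - 60, by omega⟩
        have ht : min (n - acc.length) 60 = 60 := by omega
        rw [ht]
        have hlacc' : (acc ++ (((List.range 60).map (fun j : Nat => (j : Int))).map (pvFmt m))).length
            = acc.length + 60 := by simp
        rw [ih k' (by omega) n (m + 1) _ (by rw [hlacc']; omega) (by rw [hlacc']; omega)]
        rw [List.append_assoc]
        congr 1
        rw [List.range_add, List.map_append]
        congr 1
        · rw [List.map_map]
          apply List.map_congr_left
          intro j hj
          rw [List.mem_range] at hj
          simp [Function.comp, Nat.div_eq_of_lt hj, Nat.mod_eq_of_lt hj]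
        · rw [List.map_map]
          apply List.map_congr_left
          intro j _
          simp only [Function.comp]
          have h1 : (60 + j) / 60 = j / 60 + 1 := by
            rw [Nat.add_comm]; exact Nat.add_div_right j (by norm_num)
          have h2 : (60 + j) % 60 = j % 60 := by
            rw [Nat.add_comm]; exact Nat.add_mod_right j 60
          rw [h1, h2]
          congr 1
          push_cast
          ring
    · rw [dif_neg h]
      have hk0 : k = 0 := by omega
      subst hk0
      simp

-- the string A builds at index j equals the one B builds at minute j/60, second j%60
theorem pvFmt_bridge (j : Nat) :
    (if PySem.Int.mod (j : Int) 60 < 10 then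
       PySem.Int.toStr (PySem.Int.floordiv (j : Int) 60) ++ ":0" ++ PySem.Int.toStr (PySem.Int.mod (j : Int) 60)
     else
       PySem.Int.toStr (PySem.Int.floordiv (j : Int) 60) ++ ":" ++ PySem.Int.toStr (PySem.Int.mod (j : Int) 60))
    = pvFmt ((j / 60 : Nat) : Int) ((j % 60 : Nat) : Int) := by
  have hd : PySem.Int.floordiv (j : Int) 60 = ((j / 60 : Nat) : Int) := by
    exact_mod_cast PySem.Int.floordiv_natCast j 60
  have hm : PySem.Int.mod (j : Int) 60 = ((j % 60 : Nat) : Int) := by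
    exact_mod_cast PySem.Int.mod_natCast j 60
  have h0 : (":0" : String) = ":" ++ "0" := by decide
  rw [hd, hm, pvFmt]
  by_cases hc : ((j % 60 : Nat) : Int) < 10
  · rw [if_pos hc, if_pos hc, h0]
    simp only [String.append_assoc]
  · rw [if_neg hc, if_neg hc]

theorem pv_foldl_fun_congr {α β : Type} (l : List α) (f g : β → α → β)
    (h : ∀ acc x, f acc x = g acc x) (init : β) : l.foldl f init = l.foldl g init := by
  induction l generalizing init with
  | nil => rfl
  | cons x xs ih => simp only [List.foldl_cons, h]; exact ih _

-- ===== VERDICT (by name: the statement is the Claim_ definition above) =====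
theorem seconds_to_time_spec : Claim_equal_seconds_to_time := by
  intro time _
  unfold Spec_seconds_to_time seconds_to_time_alt seconds_to_time
  rw [pvOuter_eq time.length time.length 0 [] (by simp) (by simp)]
  rw [PySem.List.pyRange_one]
  simp only [sub_zero, Int.toNat_natCast, zero_add, List.foldl_map, List.nil_append]
  rw [pv_foldl_fun_congr _ _
    (fun acc (k : Nat) => acc ++ [pvFmt ((k / 60 : Nat) : Int) ((k % 60 : Nat) : Int)])
    (by
      intro acc k
      show (if PySem.Int.mod (k : Int) 60 < 10 then
              acc ++ [PySem.Int.toStr (PySem.Int.floordiv (k : Int) 60) ++ ":0" ++ PySem.Int.toStr (PySem.Int.mod (k : Int) 60)]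
            else
              acc ++ [PySem.Int.toStr (PySem.Int.floordiv (k : Int) 60) ++ ":" ++ PySem.Int.toStr (PySem.Int.mod (k : Int) 60)])
            = acc ++ [pvFmt ((k / 60 : Nat) : Int) ((k % 60 : Nat) : Int)]
      rw [← pvFmt_bridge k]
      split <;> rfl)]
  rw [PySem.List.foldl_append_singleton_eq_map]
  simp
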